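-- pv_equiv track=rewrite | github.com/Stromxun/Book-recommendation-system-based-on-collaborative-filtering-algorithm | mysite/BookRecommendationSys/action.py | get_id_list_from_str
-- ===== SOURCE A (Python) =====
-- def get_id_list_from_str(group_list): # 输出字符串列表中的所有id
--     # example:
--     # >> group_list
--     # >> "[1001, 1002, 1003]"
--     group_id_list = []
--     group_id = 0
--     for c in group_list:
--         if (c == ',' or c == ']') and group_id:
--             group_id_list.append(group_id)
--             group_id = 0
--         elif '0' <= c <= '9':
--             group_id = 10 * group_id + int(c)
--     return group_id_list
-- ===== SOURCE B (Python) =====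
-- def get_id_list_from_str(group_list):
--     # Split-first strategy: break the string at every ',' or ']', drop the
--     # unterminated final segment, then convert each segment's digit characters.
--     segs = []
--     cur = []
--     for c in group_list:
--         if c == ',' or c == ']':
--             segs.append(cur)
--             cur = []
--         else:
--             cur.append(c)
--     # 'cur' is the tail after the last delimiter; it is never emitted.
--     out = []
--     for seg in segs:
--         digits = ''.join(ch for ch in seg if '0' <= ch <= '9')
--         if digits:
--             v = int(digits)
--             if v:
--                 out.append(v)
--     return out
-- ===== Notes on version B (the rewrite author's own statement) =====
-- stated objective: alternative
-- what changed: Replaces A's single incremental digit-accumulating scan with a split-first decomposition: break the string at each delimiter character (comma or closing bracket), drop the unterminated final segment, and convert each segment's digit characters independently.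
import Mathlib
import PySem

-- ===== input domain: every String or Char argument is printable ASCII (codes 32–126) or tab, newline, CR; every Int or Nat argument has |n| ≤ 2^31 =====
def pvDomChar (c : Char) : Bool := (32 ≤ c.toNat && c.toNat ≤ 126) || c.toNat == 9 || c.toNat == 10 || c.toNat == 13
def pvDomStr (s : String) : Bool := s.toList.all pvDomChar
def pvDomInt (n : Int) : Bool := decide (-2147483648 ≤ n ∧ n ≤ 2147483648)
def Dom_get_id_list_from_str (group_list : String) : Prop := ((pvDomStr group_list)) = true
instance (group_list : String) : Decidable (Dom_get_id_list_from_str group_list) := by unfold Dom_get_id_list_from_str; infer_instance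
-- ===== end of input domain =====

-- B replaces A's single-pass digit accumulator by split-at-delimiters then
-- per-segment digit conversion (objective: alternative decomposition, same cost).


-- ===== PORT A =====
-- one scan; emit the accumulator at ',' or ']' when nonzero, else accumulate digits.
-- int(c) on an ASCII digit char is exactly c.toNat - 48.
def get_id_list_from_str (group_list : String) : List Int :=
  (group_list.toList.foldl
    (fun (st : List Int × Int) c =>
      if (c == ',' || c == ']') && st.2 != 0 then (st.1 ++ [st.2], 0)
      else if '0' ≤ c && c ≤ '9' then (st.1, 10 * st.2 + ((c.toNat : Int) - 48))
      else st)
    ([], 0)).1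

-- ===== PORT B =====
-- split pass: segments before each ',' or ']'; the trailing rest is dropped.
def pvSplitB (cs : List Char) : List (List Char) × List Char :=
  cs.foldl
    (fun (st : List (List Char) × List Char) c =>
      if c == ',' || c == ']' then (st.1 ++ [st.2], [])
      else (st.1, st.2 ++ [c]))
    ([], [])

-- int(digits) on a nonempty ASCII-digit string is exactly this base-10 fold.
def pvDigitsVal (ds : List Char) : Int :=
  ds.foldl (fun a c => 10 * a + ((c.toNat : Int) - 48)) 0

def get_id_list_from_str_alt (group_list : String) : List Int :=
  (pvSplitB group_list.toList).1.foldl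
    (fun out seg =>
      let digits := seg.filter (fun c => '0' ≤ c && c ≤ '9')
      if digits.isEmpty then out
      else
        let v := pvDigitsVal digits
        if v == 0 then out else out ++ [v])
    []

-- ===== PRECONDITION & SPEC =====
def Spec_get_id_list_from_str (group_list : String) (out : List Int) : Prop := out = get_id_list_from_str_alt group_list
instance (group_list : String) (out : List Int) : Decidable (Spec_get_id_list_from_str group_list out) := by unfold Spec_get_id_list_from_str; infer_instance

-- ===== CLAIM (what is proved, stated in full; the proofs are below) =====
def Claim_equal_get_id_list_from_str : Prop := ∀ (group_list : String), Dom_get_id_list_from_str group_list → Spec_get_id_list_from_str group_list (get_id_list_from_str group_list)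

-- ===== LEMMAS AND PROOFS =====

-- A's per-char step
def pvStepA (st : List Int × Int) (c : Char) : List Int × Int :=
  if (c == ',' || c == ']') && st.2 != 0 then (st.1 ++ [st.2], 0)
  else if '0' ≤ c && c ≤ '9' then (st.1, 10 * st.2 + ((c.toNat : Int) - 48))
  else st

-- B's split step
def pvStepS (st : List (List Char) × List Char) (c : Char) : List (List Char) × List Char :=
  if c == ',' || c == ']' then (st.1 ++ [st.2], [])
  else (st.1, st.2 ++ [c])

-- B's per-segment step
def pvStepSeg (out : List Int) (seg : List Char) : List Int :=
  let digits := seg.filter (fun c => '0' ≤ c && c ≤ '9')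
  if digits.isEmpty then out
  else
    let v := pvDigitsVal digits
    if v == 0 then out else out ++ [v]

-- value of a segment = base-10 value of its digit characters
def pvVal (cur : List Char) : Int :=
  pvDigitsVal (cur.filter (fun c => '0' ≤ c && c ≤ '9'))

lemma pvVal_append_digit (cur : List Char) (c : Char)
    (h : ('0' ≤ c && c ≤ '9') = true) :
    pvVal (cur ++ [c]) = 10 * pvVal cur + ((c.toNat : Int) - 48) := by
  simp [pvVal, pvDigitsVal, List.filter_append, h]

lemma pvVal_append_nondigit (cur : List Char) (c : Char)
    (h : ('0' ≤ c && c ≤ '9') = false) :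
    pvVal (cur ++ [c]) = pvVal cur := by
  simp [pvVal, pvDigitsVal, List.filter_append, h]

lemma pvVal_of_no_digits (cur : List Char)
    (h : (cur.filter (fun c => '0' ≤ c && c ≤ '9')).isEmpty = true) :
    pvVal cur = 0 := by
  simp only [List.isEmpty_iff] at h
  simp [pvVal, h, pvDigitsVal]

-- emitting at a delimiter = B's per-segment step
lemma pvStepSeg_eq (out : List Int) (cur : List Char) :
    pvStepSeg out cur = if pvVal cur ≠ 0 then out ++ [pvVal cur] else out := by
  unfold pvStepSeg pvVal
  by_cases he : (cur.filter (fun c => '0' ≤ c && c ≤ '9')).isEmpty = true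
  · have h0 : pvVal cur = 0 := pvVal_of_no_digits cur he
    simp [he, pvVal] at h0 ⊢
    simp [h0]
  · simp only [eq_false_of_ne_true he, if_neg Bool.false_ne_true]
    by_cases hv : pvDigitsVal (cur.filter (fun c => '0' ≤ c && c ≤ '9')) = 0 <;>
      simp [hv]

-- split fold: the accumulated segment list is a prefix
lemma pvSplit_prefix (cs : List Char) (segs : List (List Char)) (cur : List Char) :
    List.foldl pvStepS (segs, cur) cs
      = (segs ++ (List.foldl pvStepS ([], cur) cs).1,
         (List.foldl pvStepS ([], cur) cs).2) := by
  induction cs generalizing segs cur with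
  | nil => simp
  | cons c cs ih =>
      simp only [List.foldl]
      by_cases h : (c == ',' || c == ']') = true
      · rw [show pvStepS (segs, cur) c = (segs ++ [cur], []) by simp [pvStepS, h],
            show pvStepS ([], cur) c = ([cur], []) by simp [pvStepS, h],
            ih (segs ++ [cur]) [], ih [cur] []]
        simp
      · rw [show pvStepS (segs, cur) c = (segs, cur ++ [c]) by simp [pvStepS, h],
            show pvStepS ([], cur) c = ([], cur ++ [c]) by simp [pvStepS, h]]
        exact ih segs (cur ++ [c])

-- MAIN INVARIANT: A's fold from (acc, value of cur) equals B's post-processing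
-- of the segments B's split fold still produces from cur.
lemma pvMain (cs : List Char) (acc : List Int) (cur : List Char) :
    (List.foldl pvStepA (acc, pvVal cur) cs).1
      = List.foldl pvStepSeg acc (List.foldl pvStepS ([], cur) cs).1 := by
  induction cs generalizing acc cur with
  | nil => simp
  | cons c cs ih =>
      simp only [List.foldl]
      by_cases hd : (c == ',' || c == ']') = true
      · have hnotdig : ('0' ≤ c && c ≤ '9') = false := by
          rcases Bool.or_eq_true_iff.mp hd with h | h <;>
            · have := beq_iff_eq.mp h; subst this; decide
        rw [show pvStepS ([], cur) c = ([cur], []) by simp [pvStepS, hd],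
            pvSplit_prefix cs [cur] []]
        simp only [List.foldl_append, List.foldl_cons, List.foldl_nil]
        have h0 : pvVal ([] : List Char) = 0 := rfl
        by_cases hz : pvVal cur = 0
        · have hne : (pvVal cur != 0) = false := by simp [hz]
          have : pvStepA (acc, pvVal cur) c = (acc, pvVal ([] : List Char)) := by
            simp [pvStepA, hnotdig, h0, hz]
          rw [this, ih acc [], pvStepSeg_eq]
          simp [hz]
        · have hne : (pvVal cur != 0) = true := by simpa using hz
          have : pvStepA (acc, pvVal cur) c = (acc ++ [pvVal cur], pvVal ([] : List Char)) := by
            simp [pvStepA, hd, hne, h0]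
          rw [this, ih (acc ++ [pvVal cur]) [], pvStepSeg_eq]
          simp [hz]
      · rw [show pvStepS ([], cur) c = ([], cur ++ [c]) by simp [pvStepS, hd]]
        by_cases hdig : ('0' ≤ c && c ≤ '9') = true
        · have : pvStepA (acc, pvVal cur) c = (acc, pvVal (cur ++ [c])) := by
            simp only [pvStepA, hd]
            simp [hdig, pvVal_append_digit cur c hdig]
          rw [this]; exact ih acc (cur ++ [c])
        · have : pvStepA (acc, pvVal cur) c = (acc, pvVal (cur ++ [c])) := by
            simp only [pvStepA, hd]
            simp [hdig,
              pvVal_append_nondigit cur c (by simpa using hdig)]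
          rw [this]; exact ih acc (cur ++ [c])

-- the two ports are the folds above
lemma pvA_eq (s : String) :
    get_id_list_from_str s = (List.foldl pvStepA ([], 0) s.toList).1 := rfl

lemma pvB_eq (s : String) :
    get_id_list_from_str_alt s
      = List.foldl pvStepSeg [] (List.foldl pvStepS ([], []) s.toList).1 := rfl

-- ===== VERDICT (by name: the statement is the Claim_ definition above) =====
theorem get_id_list_from_str_spec : Claim_equal_get_id_list_from_str := by
  intro s _
  unfold Spec_get_id_list_from_str
  rw [pvA_eq, pvB_eq]
  have h := pvMain s.toList [] []
  simpa [pvVal, pvDigitsVal] using h
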